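-- pv_equiv track=rewrite | github.com/LinusCode146/AdventOfCode_2023 | utils.py | edge_values
-- ===== SOURCE A (Python) =====
-- def edge_values(grid, x, y):
--     """Used to get all the indexes of adjacent values in a 2d grid (also diagonally) Day 3"""
--     adjacent_indexes = []
--     rows = len(grid)
--     cols = len(grid[0])
--
--     # Define offsets for adjacent positions
--     offsets = [
--         (-1, -1), (-1, 0), (-1, 1),
--         (0, -1), (0, 1),
--         (1, -1), (1, 0), (1, 1)
--     ]
--
--     for dx, dy in offsets:
--         new_x, new_y = x + dx, y + dy
--         if 0 <= new_x < rows and 0 <= new_y < cols: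
--             adjacent_indexes.append((new_x, new_y))
--
--     return adjacent_indexes
-- ===== SOURCE B (Python) =====
-- def edge_values(grid, x, y):
--     """Used to get all the indexes of adjacent values in a 2d grid (also diagonally) Day 3"""
--     rows = len(grid)
--     cols = len(grid[0])
--     row_lo, row_hi = max(0, x - 1), min(rows - 1, x + 1)
--     col_lo, col_hi = max(0, y - 1), min(cols - 1, y + 1)
--     adjacent_indexes = []
--     for nx in range(row_lo, row_hi + 1):
--         for ny in range(col_lo, col_hi + 1):
--             if nx != x or ny != y:
--                 adjacent_indexes.append((nx, ny))
--     return adjacent_indexes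
-- ===== Notes on version B (the rewrite author's own statement) =====
-- stated objective: simpler
-- what changed: Instead of testing a fixed list of 8 offset candidates against the bounds, B clamps each axis to its valid neighbor interval first and nested-loops over those ranges, skipping only the center; no per-candidate bounds check remains.
import Mathlib
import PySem

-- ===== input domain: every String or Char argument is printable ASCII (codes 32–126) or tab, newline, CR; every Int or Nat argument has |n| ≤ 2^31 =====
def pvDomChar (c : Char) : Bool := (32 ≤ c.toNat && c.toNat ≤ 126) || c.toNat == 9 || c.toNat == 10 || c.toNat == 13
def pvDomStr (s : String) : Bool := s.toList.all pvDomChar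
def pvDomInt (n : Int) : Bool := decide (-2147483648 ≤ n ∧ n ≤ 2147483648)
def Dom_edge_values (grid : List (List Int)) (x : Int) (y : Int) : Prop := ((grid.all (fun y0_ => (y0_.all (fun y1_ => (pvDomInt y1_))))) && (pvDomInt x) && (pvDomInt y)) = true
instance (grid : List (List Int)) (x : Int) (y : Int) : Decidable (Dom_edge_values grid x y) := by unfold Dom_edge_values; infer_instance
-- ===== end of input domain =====

-- B clamps each axis to the valid neighbor interval first and loops only over it (no per-candidate bounds check); objective: simpler.

-- ===== PORT A =====
def edge_values (grid : List (List Int)) (x : Int) (y : Int) : List (Int × Int) :=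
  let rows : Int := PySem.List.len grid
  -- grid[0]: Python raises IndexError on an empty grid; Pre_ excludes that input, so the .getD [] default is never the claimed value
  let cols : Int := PySem.List.len ((PySem.List.pyGet? grid 0).getD [])
  let offsets : List (Int × Int) :=
    [(-1, -1), (-1, 0), (-1, 1), (0, -1), (0, 1), (1, -1), (1, 0), (1, 1)]
  offsets.foldl (fun acc d =>
    if 0 ≤ x + d.1 ∧ x + d.1 < rows ∧ 0 ≤ y + d.2 ∧ y + d.2 < cols then
      acc ++ [(x + d.1, y + d.2)]
    else acc) []

-- ===== PORT B =====
def edge_values_alt (grid : List (List Int)) (x : Int) (y : Int) : List (Int × Int) :=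
  let rows : Int := PySem.List.len grid
  let cols : Int := PySem.List.len ((PySem.List.pyGet? grid 0).getD [])
  (PySem.List.pyRange (max 0 (x - 1)) (min (rows - 1) (x + 1) + 1)).foldl (fun acc nx =>
    (PySem.List.pyRange (max 0 (y - 1)) (min (cols - 1) (y + 1) + 1)).foldl (fun acc2 ny =>
      if nx ≠ x ∨ ny ≠ y then acc2 ++ [(nx, ny)] else acc2) acc) []

-- ===== PRECONDITION & SPEC =====
-- Pre_ excludes only the empty grid, on which Python's len(grid[0]) raises IndexError (in both A and B).
def Pre_edge_values (grid : List (List Int)) (x : Int) (y : Int) : Prop := grid ≠ []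
instance (grid : List (List Int)) (x : Int) (y : Int) : Decidable (Pre_edge_values grid x y) := by unfold Pre_edge_values; infer_instance
def pvWitness_edge_values : List (List Int) × Int × Int := ([[1, 2], [3, 4]], 0, 0)

def Spec_edge_values (grid : List (List Int)) (x : Int) (y : Int) (out : List (Int × Int)) : Prop := out = edge_values_alt grid x y
instance (grid : List (List Int)) (x : Int) (y : Int) (out : List (Int × Int)) : Decidable (Spec_edge_values grid x y out) := by unfold Spec_edge_values; infer_instance

-- ===== CLAIM (what is proved, stated in full; the proofs are below) =====
def Claim_equal_edge_values : Prop := ∀ (grid : List (List Int)) (x : Int) (y : Int), Dom_edge_values grid x y → Pre_edge_values grid x y → Spec_edge_values grid x y (edge_values grid x y)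

-- ===== LEMMAS AND PROOFS =====

-- a range known to span at most three values, written out
lemma range3 (a b : Int) (h : b ≤ a + 3) :
    PySem.List.pyRange a b =
      (if a < b then [a] else []) ++ (if a + 1 < b then [a + 1] else []) ++
        (if a + 2 < b then [a + 2] else []) := by
  by_cases h1 : a < b
  · rw [PySem.List.pyRange_one_cons h1]
    by_cases h2 : a + 1 < b
    · rw [PySem.List.pyRange_one_cons h2]
      rw [show a + 1 + 1 = a + 2 by ring]
      by_cases h3 : a + 2 < b
      · rw [PySem.List.pyRange_one_cons h3, PySem.List.pyRange_one_eq_nil (by omega)]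
        simp [h1, h2, h3]
      · rw [PySem.List.pyRange_one_eq_nil (by omega)]
        simp [h1, h2, h3]
    · rw [PySem.List.pyRange_one_eq_nil (by omega)]
      rw [if_pos h1, if_neg h2, if_neg (by omega)]
      simp
  · rw [PySem.List.pyRange_one_eq_nil (by omega)]
    rw [if_neg h1, if_neg (by omega), if_neg (by omega)]
    simp

-- the clamped range equals the three candidate coordinates filtered by the bounds
lemma clamp3 (t r : Int) :
    PySem.List.pyRange (max 0 (t - 1)) (min (r - 1) (t + 1) + 1) =
      [t - 1, t, t + 1].filter (fun n => decide (0 ≤ n ∧ n < r)) := by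
  rw [range3 _ _ (by omega)]
  simp only [List.filter_cons, List.filter_nil, decide_eq_true_eq]
  split_ifs <;> first
    | rfl
    | (exfalso; omega)
    | (simp; omega)

-- B's clamped nested loops, flattened to a flatMap over the filtered candidate lists
lemma Bnorm (x y r c : Int) :
    (PySem.List.pyRange (max 0 (x - 1)) (min (r - 1) (x + 1) + 1)).foldl (fun acc nx =>
        (PySem.List.pyRange (max 0 (y - 1)) (min (c - 1) (y + 1) + 1)).foldl (fun acc2 ny =>
          if nx ≠ x ∨ ny ≠ y then acc2 ++ [(nx, ny)] else acc2) acc) [] =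
      ([x - 1, x, x + 1].filter (fun n => decide (0 ≤ n ∧ n < r))).flatMap (fun nx =>
        (([y - 1, y, y + 1].filter (fun n => decide (0 ≤ n ∧ n < c))).filter
            (fun ny => decide (nx ≠ x ∨ ny ≠ y))).map (fun ny => (nx, ny))) := by
  have hin : ∀ (nx : Int) (acc : List (Int × Int)),
      (PySem.List.pyRange (max 0 (y - 1)) (min (c - 1) (y + 1) + 1)).foldl (fun acc2 ny =>
          if nx ≠ x ∨ ny ≠ y then acc2 ++ [(nx, ny)] else acc2) acc =
        acc ++ ((PySem.List.pyRange (max 0 (y - 1)) (min (c - 1) (y + 1) + 1)).filter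
            (fun ny => decide (nx ≠ x ∨ ny ≠ y))).map (fun ny => (nx, ny)) :=
    fun nx acc => PySem.List.foldl_append_ite _ _ _ _
  simp only [hin]
  rw [PySem.List.foldl_append_eq_flatMap]
  simp only [List.nil_append, clamp3]

-- A's offset loop equals B's flattened form (r, c arbitrary)
set_option maxHeartbeats 1600000 in
lemma core (x y r c : Int) :
    ([((-1 : Int), (-1 : Int)), (-1, 0), (-1, 1), (0, -1), (0, 1), (1, -1), (1, 0), (1, 1)]).foldl
        (fun (acc : List (Int × Int)) d =>
          if 0 ≤ x + d.1 ∧ x + d.1 < r ∧ 0 ≤ y + d.2 ∧ y + d.2 < c then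
            acc ++ [(x + d.1, y + d.2)]
          else acc) [] =
      ([x - 1, x, x + 1].filter (fun n => decide (0 ≤ n ∧ n < r))).flatMap (fun nx =>
        (([y - 1, y, y + 1].filter (fun n => decide (0 ≤ n ∧ n < c))).filter
            (fun ny => decide (nx ≠ x ∨ ny ≠ y))).map (fun ny => (nx, ny))) := by
  have e1 : x + -1 = x - 1 := by ring
  have e2 : y + -1 = y - 1 := by ring
  have hx1 : x - 1 ≠ x := by omega
  have hx2 : x + 1 ≠ x := by omega
  have hy1 : y - 1 ≠ y := by omega
  have hy2 : y + 1 ≠ y := by omega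
  by_cases h1 : 0 ≤ x - 1 ∧ x - 1 < r <;> by_cases h2 : 0 ≤ x ∧ x < r <;>
    by_cases h3 : 0 ≤ x + 1 ∧ x + 1 < r <;> by_cases h4 : 0 ≤ y - 1 ∧ y - 1 < c <;>
    by_cases h5 : 0 ≤ y ∧ y < c <;> by_cases h6 : 0 ≤ y + 1 ∧ y + 1 < c <;>
    first
      | (exfalso; omega)
      | simp only [List.foldl_cons, List.foldl_nil, List.filter_cons, List.filter_nil,
          List.flatMap_cons, List.flatMap_nil, List.map_cons, List.map_nil,
          List.nil_append, List.append_nil, List.cons_append, List.singleton_append,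
          decide_eq_true_eq, ne_eq, add_zero, e1, e2, h1, h2, h3, h4, h5, h6,
          hx1, hx2, hy1, hy2, eq_self_iff_true, not_false_eq_true, not_true,
          and_true, true_and, and_false, false_and, or_true, true_or, or_false, false_or,
          if_true, if_false, decide_true, decide_false, Bool.false_eq_true, List.filter_true, reduceIte]

-- ===== VERDICT (by name: the statement is the Claim_ definition above) =====
theorem edge_values_spec : Claim_equal_edge_values := by
  intro grid x y _ _
  unfold Spec_edge_values edge_values edge_values_alt
  exact (core x y _ _).trans (Bnorm x y _ _).symm
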